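-- pv_equiv track=rewrite | github.com/chenyw1990/dopamine | game/run_this.py | get_hero_enemy_pool
-- ===== SOURCE A (Python) =====
-- def get_hero_enemy_pool(game_map):
--     hero_enemy_pool = []
--     for i in range(len(game_map)):
--         for j in range(len(game_map[0])):
--             hero = [j, i]
--             if game_map[i][j] == 1:
--                 continue
--             for i_ in range(len(game_map)):
--                 for j_ in range(len(game_map[0])):
--                     enemy = [j_, i_]
--                     if game_map[i_][j_] == 1 or hero == enemy:
--                         continue
--
--                     hero_enemy_pool.append([hero, enemy])
--
--     return hero_enemy_pool
-- ===== SOURCE B (Python) =====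
-- def get_hero_enemy_pool(game_map):
--     free = []
--     for i in range(len(game_map)):
--         for j in range(len(game_map[0])):
--             if game_map[i][j] != 1:
--                 free.append([j, i])
--     return [[h, e] for h in free for e in free if e != h]
-- ===== Notes on version B (the rewrite author's own statement) =====
-- stated objective: alternative
-- what changed: A re-scans the whole grid (re-testing walls and self-equality) for every free hero cell; B makes a single grid pass collecting the free cells and then forms all ordered pairs of distinct free cells from that list.
import Mathlib
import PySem

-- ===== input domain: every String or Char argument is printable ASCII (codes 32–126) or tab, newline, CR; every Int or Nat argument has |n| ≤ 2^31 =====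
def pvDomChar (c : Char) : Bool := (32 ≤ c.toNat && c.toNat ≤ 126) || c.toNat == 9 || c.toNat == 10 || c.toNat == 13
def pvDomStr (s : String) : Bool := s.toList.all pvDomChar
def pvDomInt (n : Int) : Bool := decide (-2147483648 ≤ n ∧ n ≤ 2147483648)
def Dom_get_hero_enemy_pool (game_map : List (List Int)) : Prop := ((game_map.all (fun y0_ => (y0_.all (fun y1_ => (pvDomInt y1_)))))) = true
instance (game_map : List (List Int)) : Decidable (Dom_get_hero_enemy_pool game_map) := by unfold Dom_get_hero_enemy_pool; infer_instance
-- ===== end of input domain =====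

-- B collects the free cells in one grid pass, then pairs every two distinct free cells;
-- A instead re-scans the entire grid for every free hero cell.

-- ===== PORT A =====
def get_hero_enemy_pool (game_map : List (List Int)) : List (List (List Int)) :=
  (List.range game_map.length).foldl (fun acc (i : Nat) =>
    (List.range (game_map.headD []).length).foldl (fun acc (j : Nat) =>
      let hero : List Int := [(j : Int), (i : Int)]
      if (game_map.getD i []).getD j 0 == 1 then acc
      else
        (List.range game_map.length).foldl (fun acc (i_ : Nat) =>
          (List.range (game_map.headD []).length).foldl (fun acc (j_ : Nat) =>
            let enemy : List Int := [(j_ : Int), (i_ : Int)]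
            if (game_map.getD i_ []).getD j_ 0 == 1 || hero == enemy then acc
            else acc ++ [[hero, enemy]]) acc) acc) acc) []

-- ===== PORT B =====
def get_hero_enemy_pool_alt (game_map : List (List Int)) : List (List (List Int)) :=
  let free : List (List Int) := (List.range game_map.length).foldl (fun acc (i : Nat) =>
    (List.range (game_map.headD []).length).foldl (fun acc (j : Nat) =>
      if (game_map.getD i []).getD j 0 != 1 then acc ++ [[(j : Int), (i : Int)]]
      else acc) acc) []
  free.flatMap (fun h => (free.filter (fun e => e != h)).map (fun e => [h, e]))

-- ===== PRECONDITION & SPEC =====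
-- Pre_ excludes exactly the ragged maps on which Python A raises IndexError
-- (some row shorter than row 0, probed at a column beyond its end).
def Pre_get_hero_enemy_pool (game_map : List (List Int)) : Prop :=
  ∀ r ∈ game_map, (game_map.headD []).length ≤ r.length
instance (game_map : List (List Int)) : Decidable (Pre_get_hero_enemy_pool game_map) := by
  unfold Pre_get_hero_enemy_pool; infer_instance
def pvWitness_get_hero_enemy_pool : List (List Int) := [[0, 1], [1, 0]]

def Spec_get_hero_enemy_pool (game_map : List (List Int)) (out : List (List (List Int))) : Prop := out = get_hero_enemy_pool_alt game_map
instance (game_map : List (List Int)) (out : List (List (List Int))) : Decidable (Spec_get_hero_enemy_pool game_map out) := by unfold Spec_get_hero_enemy_pool; infer_instance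

-- ===== CLAIM (what is proved, stated in full; the proofs are below) =====
def Claim_equal_get_hero_enemy_pool : Prop := ∀ (game_map : List (List Int)), Dom_get_hero_enemy_pool game_map → Pre_get_hero_enemy_pool game_map → Spec_get_hero_enemy_pool game_map (get_hero_enemy_pool game_map)

-- ===== LEMMAS AND PROOFS =====

-- 'if cond: continue else out.append(f x)' loop shape
theorem pv_foldl_skip_if {α β : Type} (l : List α) (p : α → Bool) (f : α → β) (acc : List β) :
    l.foldl (fun a x => if p x then a else a ++ [f x]) acc
      = acc ++ (l.filter (fun x => !p x)).map f := by
  induction l generalizing acc with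
  | nil => simp
  | cons x t ih => by_cases h : p x <;> simp [List.foldl_cons, h, ih]

-- 'if cond: continue else out.extend(g x)' loop shape
theorem pv_foldl_skip_if_ext {α β : Type} (l : List α) (p : α → Bool) (g : α → List β) (acc : List β) :
    l.foldl (fun a x => if p x then a else a ++ g x) acc
      = acc ++ (l.filter (fun x => !p x)).flatMap g := by
  induction l generalizing acc with
  | nil => simp
  | cons x t ih => by_cases h : p x <;> simp [List.foldl_cons, h, ih]

theorem pv_filter_flatMap {α β : Type} (l : List α) (f : α → List β) (p : β → Bool) :
    (l.flatMap f).filter p = l.flatMap (fun x => (f x).filter p) := by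
  induction l with
  | nil => rfl
  | cons x t ih => simp [List.flatMap_cons, List.filter_append, ih]

theorem pv_beq_comm {α : Type} [BEq α] [LawfulBEq α] (a b : α) : (a == b) = (b == a) := by
  by_cases h : a = b
  · simp [h]
  · have h' : ¬ b = a := fun hb => h hb.symm
    simp [h, h']

-- ===== VERDICT (by name: the statement is the Claim_ definition above) =====
theorem get_hero_enemy_pool_spec : Claim_equal_get_hero_enemy_pool := by
  intro m _ _
  unfold Spec_get_hero_enemy_pool get_hero_enemy_pool get_hero_enemy_pool_alt
  simp only [pv_foldl_skip_if, pv_foldl_skip_if_ext, PySem.List.foldl_append_eq_flatMap,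
    PySem.List.foldl_append_if, List.nil_append]
  simp only [List.flatMap_assoc, List.flatMap_map, List.map_flatMap, List.filter_map,
    List.filter_filter, pv_filter_flatMap]
  simp only [List.map_map]
  simp [bne, Bool.not_or, Bool.and_comm, pv_beq_comm, Function.comp_def]
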